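-- pv_equiv track=rewrite | github.com/aliasgharchakera/AI-Fall22-Assignment01 | Q1/Code/JumpingFrogs.py | getHeuristic
-- ===== SOURCE A (Python) =====
-- def getHeuristic(state):
--     """
--     state: the current state of agent
--
--     THis function returns the heuristic of current state of the agent which will be the
--     estimated distance from goal.
--     """
--     heuristic = 0
--     for i in range(len(state)):
--         if state[i] != "b" and i < 3:
--             for j in range(i, len(state)):
--                 if state[j] == "b":
--                     heuristic += j
--
--         if state[i] != "g" and i > 3:
--             for j in range(i):
--                 if state[j] == "g":
--                     heuristic += (i-j)
--     return heuristic
-- ===== SOURCE B (Python) =====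
-- def getHeuristic(state):
--     # One pass with running prefix sums of 'g'/'b' positions instead of nested scans.
--     totalB = sum(j for j, c in enumerate(state) if c == "b")
--     heuristic = 0
--     prefB = 0      # sum of indices of 'b' seen so far (strictly before i)
--     gcnt = 0       # number of 'g' strictly before i
--     gsum = 0       # sum of indices of 'g' strictly before i
--     for i, c in enumerate(state):
--         if c != "b" and i < 3:
--             heuristic += totalB - prefB
--         if c != "g" and i > 3:
--             heuristic += i * gcnt - gsum
--         if c == "b":
--             prefB += i
--         elif c == "g":
--             gcnt += 1
--             gsum += i
--     return heuristic
-- ===== Notes on version B (the rewrite author's own statement) =====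
-- stated objective: faster
-- what changed: Replaced A's nested rescans (for each misplaced outer position, an inner scan over the whole string summing 'b' indices or 'g' distances) by a single pass that maintains running prefix sums/counts of 'b' and 'g' positions plus one precomputed total of 'b' indices.
import Mathlib
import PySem

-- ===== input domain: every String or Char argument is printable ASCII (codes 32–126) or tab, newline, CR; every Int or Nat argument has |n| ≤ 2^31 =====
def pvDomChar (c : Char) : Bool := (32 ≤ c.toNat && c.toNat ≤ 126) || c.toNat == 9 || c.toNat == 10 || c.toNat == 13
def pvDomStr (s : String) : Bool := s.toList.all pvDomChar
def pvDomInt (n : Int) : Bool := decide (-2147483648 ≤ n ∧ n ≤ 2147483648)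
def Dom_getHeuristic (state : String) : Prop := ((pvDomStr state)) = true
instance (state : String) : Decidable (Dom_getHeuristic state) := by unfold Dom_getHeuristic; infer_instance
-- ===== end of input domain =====

-- B replaces A's nested rescans by one pass keeping running prefix sums/counts of 'b'/'g'
-- positions (objective: faster).

-- ===== PORT A =====
-- literal transliteration of A: outer loop over range(len(state)), two inner rescans
def getHeuristic (state : String) : Int :=
  (PySem.List.pyRange 0 (state.toList.length : Int) 1).foldl
    (fun heuristic i =>
      let heuristic :=
        if PySem.List.pyGetD state.toList i ' ' ≠ 'b' ∧ i < 3 then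
          (PySem.List.pyRange i (state.toList.length : Int) 1).foldl
            (fun h j => if PySem.List.pyGetD state.toList j ' ' = 'b' then h + j else h)
            heuristic
        else heuristic
      if PySem.List.pyGetD state.toList i ' ' ≠ 'g' ∧ 3 < i then
        (PySem.List.pyRange 0 i 1).foldl
          (fun h j => if PySem.List.pyGetD state.toList j ' ' = 'g' then h + (i - j) else h)
          heuristic
      else heuristic)
    0

-- ===== PORT B =====
-- transliteration of Source B: totalB by one enumerate pass, then one enumerate pass with
-- running state (heuristic, prefB, gcnt, gsum)
def getHeuristic_alt (state : String) : Int :=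
  let totalB : Int :=
    (PySem.List.enumerate state.toList).foldl
      (fun acc jc => if jc.2 = 'b' then acc + jc.1 else acc) 0
  let r :=
    (PySem.List.enumerate state.toList).foldl
      (fun st ic =>
        let heuristic := st.1
        let prefB := st.2.1
        let gcnt := st.2.2.1
        let gsum := st.2.2.2
        let i := ic.1
        let c := ic.2
        let heuristic :=
          if c ≠ 'b' ∧ i < 3 then heuristic + (totalB - prefB) else heuristic
        let heuristic :=
          if c ≠ 'g' ∧ 3 < i then heuristic + (i * gcnt - gsum) else heuristic
        if c = 'b' then (heuristic, prefB + i, gcnt, gsum)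
        else if c = 'g' then (heuristic, prefB, gcnt + 1, gsum + i)
        else (heuristic, prefB, gcnt, gsum))
      ((0 : Int), (0 : Int), (0 : Int), (0 : Int))
  r.1

-- ===== PRECONDITION & SPEC =====
def Spec_getHeuristic (state : String) (out : Int) : Prop := out = getHeuristic_alt state
instance (state : String) (out : Int) : Decidable (Spec_getHeuristic state out) := by unfold Spec_getHeuristic; infer_instance

-- ===== CLAIM (what is proved, stated in full; the proofs are below) =====
def Claim_equal_getHeuristic : Prop := ∀ (state : String), Dom_getHeuristic state → Spec_getHeuristic state (getHeuristic state)

-- ===== LEMMAS AND PROOFS =====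

-- sum of the indices (counted from k) at which character c occurs
def pvIdxSum (c : Char) (k : Int) : List Char → Int
  | [] => 0
  | x :: t => (if x = c then k else 0) + pvIdxSum c (k + 1) t

def pvCnt (c : Char) (l : List Char) : Int := (l.countP (· = c) : Int)

-- the amount A's outer-loop body adds at index k of list l
def pvContrib (l : List Char) (k : Nat) : Int :=
  (if l.getD k ' ' ≠ 'b' ∧ (k : Int) < 3 then pvIdxSum 'b' (k : Int) (l.drop k) else 0)
  + (if l.getD k ' ' ≠ 'g' ∧ 3 < (k : Int) then
      (k : Int) * pvCnt 'g' (l.take k) - pvIdxSum 'g' 0 (l.take k) else 0)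

-- sum of pvContrib over positions k, k+1, …  (the suffix t = l.drop k drives the recursion)
def pvContribSum (l : List Char) : Nat → List Char → Int
  | _, [] => 0
  | k, _ :: t => pvContrib l k + pvContribSum l (k + 1) t

theorem pvIdxSum_append (c : Char) (xs ys : List Char) : ∀ (k : Int),
    pvIdxSum c k (xs ++ ys) = pvIdxSum c k xs + pvIdxSum c (k + xs.length) ys := by
  induction xs with
  | nil => intro k; simp [pvIdxSum]
  | cons x t ih =>
    intro k
    simp only [List.cons_append, pvIdxSum, ih (k + 1), List.length_cons]
    push_cast
    rw [show k + ((t.length : Int) + 1) = k + 1 + (t.length : Int) from by ring]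
    ring

theorem pv_inner1 : ∀ (t pre : List Char) (h : Int),
    (PySem.List.pyRange (pre.length : Int) ((pre.length + t.length : Nat) : Int) 1).foldl
      (fun h j => if PySem.List.pyGetD (pre ++ t) j ' ' = 'b' then h + j else h) h
    = h + pvIdxSum 'b' (pre.length : Int) t := by
  intro t
  induction t with
  | nil => intro pre h; simp [pvIdxSum, pysem]
  | cons c t' ih =>
    intro pre h
    have hlt : (pre.length : Int) < ((pre.length + (c :: t').length : Nat) : Int) := by
      exact_mod_cast (by simp : pre.length < pre.length + (c :: t').length)
    rw [PySem.List.pyRange_one_cons hlt]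
    simp only [List.foldl_cons]
    have hget : PySem.List.pyGetD (pre ++ c :: t') (pre.length : Int) ' ' = c := by
      rw [PySem.List.pyGetD_natCast]
      simp [List.getD_eq_getElem?_getD]
    rw [hget]
    have h2 := ih (pre ++ [c]) (if c = 'b' then h + (pre.length : Int) else h)
    simp only [List.append_assoc, List.singleton_append, List.length_append,
      List.length_cons] at h2 ⊢
    have e : pre.length + (t'.length + 1) = pre.length + 1 + t'.length := by omega
    rw [e]
    simp only [List.length_nil] at h2
    push_cast at h2 ⊢
    rw [h2, pvIdxSum]
    split_ifs <;> ring

theorem pv_inner2 (l : List Char) : ∀ (k : Nat), k ≤ l.length → ∀ (i h : Int),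
    (PySem.List.pyRange 0 (k : Int) 1).foldl
      (fun h j => if PySem.List.pyGetD l j ' ' = 'g' then h + (i - j) else h) h
    = h + (i * pvCnt 'g' (l.take k) - pvIdxSum 'g' 0 (l.take k)) := by
  intro k
  induction k with
  | zero => intro _ i h; simp [pvCnt, pvIdxSum, pysem]
  | succ k ih =>
    intro hk i h
    have h1 : PySem.List.pyRange 0 ((k + 1 : Nat) : Int) 1
        = PySem.List.pyRange 0 (k : Int) 1 ++ [(k : Int)] := by
      rw [show (((k + 1 : Nat)) : Int) = (k : Int) + 1 from by push_cast; ring]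
      exact PySem.List.pyRange_one_succ_right (by positivity)
    rw [h1, List.foldl_append, ih (by omega)]
    simp only [List.foldl_cons, List.foldl_nil]
    rw [PySem.List.pyGetD_natCast]
    have htake : l.take (k + 1) = l.take k ++ [l.getD k ' '] := by
      have hkl : k < l.length := by omega
      rw [List.take_add_one, List.getElem?_eq_getElem hkl, List.getD_eq_getElem l ' ' hkl]
      rfl
    rw [htake, pvIdxSum_append]
    have hlen : ((l.take k).length : Int) = (k : Int) := by
      simp [List.length_take]; omega
    rw [hlen]
    simp only [pvCnt, List.countP_append, List.countP_cons, List.countP_nil, pvIdxSum]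
    split_ifs with hc h2 <;> simp_all <;> push_cast <;> ring

theorem pv_outerA : ∀ (t pre : List Char) (h : Int),
    (PySem.List.pyRange (pre.length : Int) ((pre.length + t.length : Nat) : Int) 1).foldl
      (fun heuristic i =>
        let heuristic :=
          if PySem.List.pyGetD (pre ++ t) i ' ' ≠ 'b' ∧ i < 3 then
            (PySem.List.pyRange i ((pre.length + t.length : Nat) : Int) 1).foldl
              (fun h j => if PySem.List.pyGetD (pre ++ t) j ' ' = 'b' then h + j else h)
              heuristic
          else heuristic
        if PySem.List.pyGetD (pre ++ t) i ' ' ≠ 'g' ∧ 3 < i then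
          (PySem.List.pyRange 0 i 1).foldl
            (fun h j => if PySem.List.pyGetD (pre ++ t) j ' ' = 'g' then h + (i - j) else h)
            heuristic
        else heuristic) h
    = h + pvContribSum (pre ++ t) pre.length t := by
  intro t
  induction t with
  | nil => intro pre h; simp [pvContribSum, pysem]
  | cons c t' ih =>
    intro pre h
    have hlt : (pre.length : Int) < ((pre.length + (c :: t').length : Nat) : Int) := by
      exact_mod_cast (by simp : pre.length < pre.length + (c :: t').length)
    rw [PySem.List.pyRange_one_cons hlt]
    simp only [List.foldl_cons]
    rw [pv_inner1 (c :: t') pre, pv_inner2 (pre ++ c :: t') pre.length (by simp) (pre.length : Int)]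
    show _ = h + (pvContrib (pre ++ c :: t') pre.length
      + pvContribSum (pre ++ c :: t') (pre.length + 1) t')
    have ih2 := ih (pre ++ [c])
    simp only [List.append_assoc, List.singleton_append, List.length_append,
      List.length_cons, List.length_nil, Nat.zero_add] at ih2 ⊢
    have e : pre.length + (t'.length + 1) = pre.length + 1 + t'.length := by omega
    rw [e]
    push_cast at ih2 ⊢
    rw [ih2]
    have hdrop : (pre ++ c :: t').drop pre.length = c :: t' := by simp
    simp only [pvContrib, PySem.List.pyGetD_natCast, hdrop]
    push_cast
    split_ifs <;> ring

theorem pv_totalB : ∀ (t : List Char) (k : Nat) (acc : Int),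
    (PySem.List.enumerate t (k : Int)).foldl
      (fun acc jc => if jc.2 = 'b' then acc + jc.1 else acc) acc
    = acc + pvIdxSum 'b' (k : Int) t := by
  intro t
  induction t with
  | nil => intro k acc; simp [pvIdxSum, PySem.List.enumerate]
  | cons c t' ih =>
    intro k acc
    show (PySem.List.enumerate t' ((k : Int) + 1)).foldl _
        (if c = 'b' then acc + (k : Int) else acc) = _
    rw [show ((k : Int) + 1) = ((k + 1 : Nat) : Int) from by push_cast; ring, ih (k + 1)]
    simp only [pvIdxSum]
    push_cast
    split_ifs <;> ring

theorem pv_Bloop : ∀ (t pre : List Char) (T h : Int),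
    T = pvIdxSum 'b' 0 (pre ++ t) →
    ((PySem.List.enumerate t (pre.length : Int)).foldl
      (fun st ic =>
        let heuristic := st.1
        let prefB := st.2.1
        let gcnt := st.2.2.1
        let gsum := st.2.2.2
        let i := ic.1
        let c := ic.2
        let heuristic :=
          if c ≠ 'b' ∧ i < 3 then heuristic + (T - prefB) else heuristic
        let heuristic :=
          if c ≠ 'g' ∧ 3 < i then heuristic + (i * gcnt - gsum) else heuristic
        if c = 'b' then (heuristic, prefB + i, gcnt, gsum)
        else if c = 'g' then (heuristic, prefB, gcnt + 1, gsum + i)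
        else (heuristic, prefB, gcnt, gsum))
      (h, pvIdxSum 'b' 0 pre, pvCnt 'g' pre, pvIdxSum 'g' 0 pre)).1
    = h + pvContribSum (pre ++ t) pre.length t := by
  intro t
  induction t with
  | nil => intro pre T h _; simp [pvContribSum, PySem.List.enumerate]
  | cons c t' ih =>
    intro pre T h hT
    rw [show PySem.List.enumerate (c :: t') (pre.length : Int)
        = ((pre.length : Int), c) :: PySem.List.enumerate t' ((pre.length : Int) + 1) from rfl]
    simp only [List.foldl_cons]
    have hT' : T = pvIdxSum 'b' 0 ((pre ++ [c]) ++ t') := by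
      simpa [List.append_assoc] using hT
    have hTB : T - pvIdxSum 'b' 0 pre = pvIdxSum 'b' (pre.length : Int) (c :: t') := by
      rw [hT, pvIdxSum_append]
      simp
    have hget : (pre ++ c :: t').getD pre.length ' ' = c := by
      simp [List.getD_eq_getElem?_getD]
    have htake : (pre ++ c :: t').take pre.length = pre := by simp
    have hdrop : (pre ++ c :: t').drop pre.length = c :: t' := by simp
    have hstart : ((pre.length : Int) + 1) = (((pre ++ [c]).length : Nat) : Int) := by
      push_cast; simp
    show _ = h + pvContribSum (pre ++ c :: t') pre.length (c :: t')
    have key : ∀ (s1 : Int × Int × Int × Int),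
        s1.1 = h + pvContrib (pre ++ c :: t') pre.length →
        s1.2.1 = pvIdxSum 'b' 0 (pre ++ [c]) →
        s1.2.2.1 = pvCnt 'g' (pre ++ [c]) →
        s1.2.2.2 = pvIdxSum 'g' 0 (pre ++ [c]) →
        (List.foldl
          (fun st ic =>
            let heuristic := st.1
            let prefB := st.2.1
            let gcnt := st.2.2.1
            let gsum := st.2.2.2
            let i := ic.1
            let c := ic.2
            let heuristic :=
              if c ≠ 'b' ∧ i < 3 then heuristic + (T - prefB) else heuristic
            let heuristic :=
              if c ≠ 'g' ∧ 3 < i then heuristic + (i * gcnt - gsum) else heuristic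
            if c = 'b' then (heuristic, prefB + i, gcnt, gsum)
            else if c = 'g' then (heuristic, prefB, gcnt + 1, gsum + i)
            else (heuristic, prefB, gcnt, gsum))
          s1 (PySem.List.enumerate t' ((pre.length : Int) + 1))).1
          = h + pvContribSum (pre ++ c :: t') pre.length (c :: t') := by
      intro s1 e1 e2 e3 e4
      have hs : s1 = (s1.1, s1.2.1, s1.2.2.1, s1.2.2.2) := rfl
      rw [hs, e1, e2, e3, e4, hstart, ih (pre ++ [c]) T _ hT']
      simp only [pvContribSum, List.append_assoc, List.singleton_append,
        List.length_append, List.length_cons, List.length_nil, Nat.zero_add]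
      ring
    apply key
    · clear ih key hT hT'
      simp only [pvContrib, hget, hdrop, htake, ← hTB]
      split_ifs <;> ring
    · clear ih key hT hT' hTB
      simp only [pvIdxSum_append, pvIdxSum]
      split_ifs <;> simp_all
    · clear ih key hT hT' hTB
      simp only [pvCnt, List.countP_append, List.countP_cons, List.countP_nil]
      split_ifs <;> simp_all
    · clear ih key hT hT' hTB
      simp only [pvIdxSum_append, pvIdxSum]
      split_ifs <;> simp_all

theorem pv_A_eq (state : String) :
    getHeuristic state = pvContribSum state.toList 0 state.toList := by
  have h := pv_outerA state.toList []
  simp only [List.nil_append, List.length_nil, Nat.zero_add] at h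
  simpa using h 0

theorem pv_B_eq (state : String) :
    getHeuristic_alt state = pvContribSum state.toList 0 state.toList := by
  unfold getHeuristic_alt
  have h1 : (PySem.List.enumerate state.toList).foldl
      (fun acc jc => if jc.2 = 'b' then acc + jc.1 else acc) 0
      = pvIdxSum 'b' 0 state.toList := by
    simpa using pv_totalB state.toList 0 0
  simp only [h1]
  have h2 := pv_Bloop state.toList [] (pvIdxSum 'b' 0 state.toList) 0 (by simp)
  simp only [List.nil_append, List.length_nil, Nat.cast_zero, pvIdxSum, pvCnt,
    List.countP_nil] at h2 ⊢
  simpa using h2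

-- ===== VERDICT (by name: the statement is the Claim_ definition above) =====
theorem getHeuristic_spec : Claim_equal_getHeuristic := by
  intro state _
  unfold Spec_getHeuristic
  rw [pv_A_eq, pv_B_eq]
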